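-- pv_equiv track=rewrite | github.com/sjtu-sai-agents/PhysMaster | core/mcts.py | _deduplicate_knowledge
-- ===== SOURCE A (Python) =====
-- def _deduplicate_knowledge(knowledge: str, seen: set) -> str:
--     """Remove ## Verified Knowledge blocks that have already been
--     included in a previous ancestor. Updates `seen` in place."""
--     if not knowledge:
--         return ""
--
--     lines = knowledge.split('\n')
--     result = []
--     current_block_tag = None
--     skip_current_block = False
--
--     for line in lines:
--         # Detect start of a verified block
--         stripped = line.strip()
--         if stripped.startswith('## Verified Knowledge from Node'):
--             current_block_tag = stripped
--             if current_block_tag in seen: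
--                 skip_current_block = True
--             else:
--                 seen.add(current_block_tag)
--                 skip_current_block = False
--                 result.append(line)
--             continue
--
--         # Detect old-style [Verified by Node X] blocks
--         if stripped.startswith('[Verified by Node'):
--             current_block_tag = stripped.split(']')[0] + ']'
--             if current_block_tag in seen:
--                 skip_current_block = True
--             else:
--                 seen.add(current_block_tag)
--                 skip_current_block = False
--                 result.append(line)
--             continue
--
--         # Detect end of verified block: another heading or top-level section
--         if current_block_tag and (stripped.startswith('## ') and not stripped.startswith('## Verified')):
--             current_block_tag = None
--             skip_current_block = False
--             result.append(line)
--             continue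
--
--         if not skip_current_block:
--             result.append(line)
--
--     return '\n'.join(result).strip()
-- ===== SOURCE B (Python) =====
-- def _deduplicate_knowledge(knowledge: str, seen: set) -> str:
--     """Remove ## Verified Knowledge blocks that have already been
--     included in a previous ancestor. Updates `seen` in place."""
--     if not knowledge:
--         return ""
--
--     # Phase 1: cut the lines into consecutive segments (tag, lines).
--     # A tagged segment starts at a verified-block marker line; a segment
--     # with tag None is untagged text.  `seen` is not consulted here.
--     segments = []
--     cur = None
--     for line in knowledge.split('\n'):
--         s = line.strip()
--         if s.startswith('## Verified Knowledge from Node'):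
--             if cur is not None:
--                 segments.append(cur)
--             cur = (s, [line])
--         elif s.startswith('[Verified by Node'):
--             if cur is not None:
--                 segments.append(cur)
--             cur = (s.split(']')[0] + ']', [line])
--         elif cur is not None and cur[0] is not None and \
--                 s.startswith('## ') and not s.startswith('## Verified'):
--             # a non-verified heading ends the tagged block and starts untagged text
--             segments.append(cur)
--             cur = (None, [line])
--         elif cur is not None:
--             cur[1].append(line)
--         else:
--             cur = (None, [line])
--     if cur is not None:
--         segments.append(cur)
--
--     # Phase 2: emit segments in order, dropping every tagged segment
--     # whose tag was already seen; record new tags in `seen`.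
--     out = []
--     for tag, ls in segments:
--         if tag is None:
--             out.extend(ls)
--         elif tag not in seen:
--             seen.add(tag)
--             out.extend(ls)
--     return '\n'.join(out).strip()
-- ===== Notes on version B (the rewrite author's own statement) =====
-- stated objective: alternative
-- what changed: Replaces A's per-line state machine (current tag + skip flag threaded with the seen-set through one loop) by a two-phase decomposition: first cut the text into tagged/untagged segments without touching `seen`, then a separate emit pass that keeps or drops whole segments by tag.
import Mathlib
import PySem

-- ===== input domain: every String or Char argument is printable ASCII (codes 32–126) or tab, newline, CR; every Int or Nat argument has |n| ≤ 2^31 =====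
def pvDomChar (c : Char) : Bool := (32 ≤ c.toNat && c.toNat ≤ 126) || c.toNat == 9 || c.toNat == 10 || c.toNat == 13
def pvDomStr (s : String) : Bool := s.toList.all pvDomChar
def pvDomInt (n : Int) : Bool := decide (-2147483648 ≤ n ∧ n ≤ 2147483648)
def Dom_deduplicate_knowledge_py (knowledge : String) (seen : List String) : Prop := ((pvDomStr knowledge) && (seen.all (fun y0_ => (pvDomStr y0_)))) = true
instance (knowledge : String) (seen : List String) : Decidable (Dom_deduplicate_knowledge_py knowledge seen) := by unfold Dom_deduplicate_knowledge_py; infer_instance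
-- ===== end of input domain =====

-- B replaces A's per-line state machine by a two-phase decomposition (segment the text,
-- then keep/drop whole segments by tag); equivalence is about the RETURN value only —
-- both Pythons also update `seen` in place (they perform the same mutation).

-- shared primitive: s.split(sep) for the nonempty literal separators used below
def pySplit (s sep : String) : List String := (PySem.Str.split? s sep).getD []

-- ===== PORT A =====
-- state: (result, current_block_tag, skip_current_block, seen)
def dedupStepA (st : List String × Option String × Bool × PySem.Set String) (line : String) :
    List String × Option String × Bool × PySem.Set String :=
  let (result, tag, skip, sn) := st
  let stripped := PySem.Str.strip line
  if PySem.Str.startswith stripped "## Verified Knowledge from Node" then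
    if PySem.Set.contains sn stripped then (result, some stripped, true, sn)
    else (result ++ [line], some stripped, false, PySem.Set.add sn stripped)
  else if PySem.Str.startswith stripped "[Verified by Node" then
    let t := (pySplit stripped "]").headD "" ++ "]"   -- split never returns [], so [0] is headD
    if PySem.Set.contains sn t then (result, some t, true, sn)
    else (result ++ [line], some t, false, PySem.Set.add sn t)
  -- Python truthiness `current_block_tag and …`: the tag is never the empty string
  -- (it always starts with '#' or '['), so it is `isSome` here
  else if tag.isSome && (PySem.Str.startswith stripped "## " && !PySem.Str.startswith stripped "## Verified") then
    (result ++ [line], none, false, sn)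
  else if !skip then (result ++ [line], tag, skip, sn)
  else (result, tag, skip, sn)

def deduplicate_knowledge_py (knowledge : String) (seen : List String) : String :=
  if knowledge = "" then ""
  else
    let st := (pySplit knowledge "\n").foldl dedupStepA ([], none, false, PySem.Set.ofList seen)
    PySem.Str.strip (PySem.Str.join "\n" st.1)

-- ===== PORT B =====
-- a segment: (tag, lines); tag = none means untagged text
abbrev DedupSeg := Option String × List String

def segFlush (segs : List DedupSeg) (cur : Option DedupSeg) : List DedupSeg :=
  match cur with
  | none => segs
  | some c => segs ++ [c]

def segStep (st : List DedupSeg × Option DedupSeg) (line : String) : List DedupSeg × Option DedupSeg :=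
  let (segs, cur) := st
  let s := PySem.Str.strip line
  if PySem.Str.startswith s "## Verified Knowledge from Node" then
    (segFlush segs cur, some (some s, [line]))
  else if PySem.Str.startswith s "[Verified by Node" then
    (segFlush segs cur, some (some ((pySplit s "]").headD "" ++ "]"), [line]))
  else
    match cur with
    | some (some t, ls) =>
      if PySem.Str.startswith s "## " && !PySem.Str.startswith s "## Verified" then
        (segs ++ [(some t, ls)], some (none, [line]))
      else (segs, some (some t, ls ++ [line]))
    | some (none, ls) => (segs, some (none, ls ++ [line]))
    | none => (segs, some (none, [line]))

def emitStep (st : List String × PySem.Set String) (seg : DedupSeg) : List String × PySem.Set String :=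
  match seg with
  | (none, ls) => (st.1 ++ ls, st.2)
  | (some t, ls) => if PySem.Set.contains st.2 t then st else (st.1 ++ ls, PySem.Set.add st.2 t)

def deduplicate_knowledge_py_alt (knowledge : String) (seen : List String) : String :=
  if knowledge = "" then ""
  else
    let p := (pySplit knowledge "\n").foldl segStep ([], none)
    let out := (segFlush p.1 p.2).foldl emitStep ([], PySem.Set.ofList seen)
    PySem.Str.strip (PySem.Str.join "\n" out.1)

-- ===== PRECONDITION & SPEC =====
def Spec_deduplicate_knowledge_py (knowledge : String) (seen : List String) (out : String) : Prop := out = deduplicate_knowledge_py_alt knowledge seen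
instance (knowledge : String) (seen : List String) (out : String) : Decidable (Spec_deduplicate_knowledge_py knowledge seen out) := by unfold Spec_deduplicate_knowledge_py; infer_instance

-- ===== CLAIM (what is proved, stated in full; the proofs are below) =====
def Claim_equal_deduplicate_knowledge_py : Prop := ∀ (knowledge : String) (seen : List String), Dom_deduplicate_knowledge_py knowledge seen → Spec_deduplicate_knowledge_py knowledge seen (deduplicate_knowledge_py knowledge seen)

-- ===== LEMMAS AND PROOFS =====

-- the coupling invariant between A's per-line state and B's segmentation state
def dedupRel (sn0 : PySem.Set String)
    (sa : List String × Option String × Bool × PySem.Set String)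
    (sb : List DedupSeg × Option DedupSeg) : Prop :=
  sa.1 = ((segFlush sb.1 sb.2).foldl emitStep ([], sn0)).1 ∧
  sa.2.2.2 = ((segFlush sb.1 sb.2).foldl emitStep ([], sn0)).2 ∧
  (match sb.2 with
   | none => sb.1 = [] ∧ sa.2.1 = none ∧ sa.2.2.1 = false
   | some (ctag, _) =>
       sa.2.1 = ctag ∧
       sa.2.2.1 = (match ctag with
                   | none => false
                   | some t => PySem.Set.contains ((sb.1.foldl emitStep ([], sn0)).2) t))

theorem dedupRel_step (sn0 : PySem.Set String) (sa : List String × Option String × Bool × PySem.Set String)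
    (sb : List DedupSeg × Option DedupSeg) (line : String) (h : dedupRel sn0 sa sb) :
    dedupRel sn0 (dedupStepA sa line) (segStep sb line) := by
  obtain ⟨res, tag, skip, sn⟩ := sa
  obtain ⟨segs, cur⟩ := sb
  obtain ⟨h1, h2, h3⟩ := h
  simp only at h1 h2 h3
  unfold dedupStepA segStep
  dsimp only
  generalize (PySem.Str.strip line) = s
  generalize ((pySplit s "]").headD "" ++ "]") = t2
  generalize hb1 : PySem.Str.startswith s "## Verified Knowledge from Node" = b1
  generalize hb2 : PySem.Str.startswith s "[Verified by Node" = b2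
  generalize hb3 : (PySem.Str.startswith s "## " && !PySem.Str.startswith s "## Verified") = b3
  clear hb1 hb2 hb3
  cases cur with
  | none =>
    obtain ⟨hs, ht, hk⟩ := h3
    subst hs ht hk
    simp only [segFlush, List.foldl_nil] at h1 h2
    subst h1 h2
    cases b1 with
    | true =>
      by_cases cm : s ∈ sn <;> simp [dedupRel, cm, segFlush, emitStep]
    | false =>
      cases b2 with
      | true =>
        by_cases cm : t2 ∈ sn <;> simp [dedupRel, cm, segFlush, emitStep]
      | false => simp [dedupRel, segFlush, emitStep]
  | some c =>
    obtain ⟨ctag, ls⟩ := c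
    obtain ⟨ht, hk⟩ := h3
    subst ht
    simp only [segFlush, List.foldl_append, List.foldl_cons, List.foldl_nil] at h1 h2
    cases tag with
    | none =>
      have hk' : skip = false := hk
      subst hk'
      simp only [emitStep] at h1 h2
      subst h1 h2
      cases b1 with
      | true =>
        by_cases cm : s ∈ (List.foldl emitStep ([], sn0) segs).2 <;>
          simp [dedupRel, cm, segFlush, List.foldl_append, emitStep]
      | false =>
        cases b2 with
        | true =>
          by_cases cm : t2 ∈ (List.foldl emitStep ([], sn0) segs).2 <;>
            simp [dedupRel, cm, segFlush, List.foldl_append, emitStep]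
        | false =>
          simp [dedupRel, segFlush, List.foldl_append, emitStep]
    | some t =>
      by_cases cmt : t ∈ (List.foldl emitStep ([], sn0) segs).2
      · have hk' : skip = true := by rw [hk]; simpa using cmt
        subst hk'
        simp only [emitStep, if_pos (by simpa using cmt : PySem.Set.contains (segs.foldl emitStep ([], sn0)).2 t = true)] at h1 h2
        subst h1 h2
        cases b1 with
        | true =>
          by_cases cm : s ∈ (List.foldl emitStep ([], sn0) segs).2 <;>
            simp [dedupRel, cm, cmt, segFlush, List.foldl_append, emitStep]
        | false =>
          cases b2 with
          | true =>
            by_cases cm : t2 ∈ (List.foldl emitStep ([], sn0) segs).2 <;>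
              simp [dedupRel, cm, cmt, segFlush, List.foldl_append, emitStep]
          | false =>
            cases b3 with
            | true => simp [dedupRel, cmt, segFlush, List.foldl_append, emitStep]
            | false => simp [dedupRel, cmt, segFlush, List.foldl_append, emitStep]
      · have hk' : skip = false := by rw [hk]; simpa using cmt
        subst hk'
        simp only [emitStep, if_neg (by simpa using cmt : ¬ PySem.Set.contains (segs.foldl emitStep ([], sn0)).2 t = true)] at h1 h2
        subst h1 h2
        cases b1 with
        | true =>
          by_cases cma : s ∈ (List.foldl emitStep ([], sn0) segs).2 <;> by_cases cmb : s = t <;>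
            simp [dedupRel, cma, cmb, cmt, segFlush, List.foldl_append, emitStep]
        | false =>
          cases b2 with
          | true =>
            by_cases cma : t2 ∈ (List.foldl emitStep ([], sn0) segs).2 <;> by_cases cmb : t2 = t <;>
              simp [dedupRel, cma, cmb, cmt, segFlush, List.foldl_append, emitStep]
          | false =>
            cases b3 with
            | true => simp [dedupRel, cmt, segFlush, List.foldl_append, emitStep]
            | false => simp [dedupRel, cmt, segFlush, List.foldl_append, emitStep]

set_option maxHeartbeats 1000000 in
theorem dedupRel_foldl (sn0 : PySem.Set String) (lines : List String)
    (sa : List String × Option String × Bool × PySem.Set String)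
    (sb : List DedupSeg × Option DedupSeg) (h : dedupRel sn0 sa sb) :
    dedupRel sn0 (lines.foldl dedupStepA sa) (lines.foldl segStep sb) := by
  induction lines generalizing sa sb with
  | nil => exact h
  | cons l ls ih => exact ih _ _ (dedupRel_step sn0 sa sb l h)

-- ===== VERDICT (by name: the statement is the Claim_ definition above) =====
theorem deduplicate_knowledge_py_spec : Claim_equal_deduplicate_knowledge_py := by
  intro knowledge seen _
  unfold Spec_deduplicate_knowledge_py deduplicate_knowledge_py deduplicate_knowledge_py_alt
  by_cases hk : knowledge = ""
  · simp only [hk, if_true]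
  · simp only [hk, if_false]
    have h0 : dedupRel (PySem.Set.ofList seen)
        ([], none, false, PySem.Set.ofList seen) ([], none) := by
      exact ⟨rfl, rfl, rfl, rfl, rfl⟩
    have h := dedupRel_foldl (PySem.Set.ofList seen) (pySplit knowledge "\n") _ _ h0
    obtain ⟨h1, _, _⟩ := h
    rw [h1]
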